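-- pv_equiv track=rewrite | github.com/lukkelele/hacking | penetration-tools/bruteforce/allPasswordLengths.py | fiveCharacters
-- ===== SOURCE A (Python) =====
-- def oneCharacter(dictionary):
--     variations = []
--
--     for i in dictionary:
--         variations.append(i)
--     return variations
--
-- def twoCharacters(dictionary):
--     old = oneCharacter(dictionary)
--     variations = []
--     for k in dictionary:
--         for i in dictionary:
--             combo = str(k+i)
--             variations.append(combo)
--     return variations+old
--
-- def threeCharacters(dictionary):
--     old = twoCharacters(dictionary)
--     variations = []
--     for k in dictionary:
--         for l in dictionary:
--             for i in dictionary: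
--                 combo = str(k+l+i)
--                 variations.append(combo)
--     return variations+old
--
-- def fourCharacters(dictionary):
--     old = threeCharacters(dictionary)
--     variations = []
--     for k in dictionary:
--         for d in dictionary:
--             for l in dictionary:
--                 for i in dictionary:
--                     combo = str(k+d+l+i)
--                     variations.append(combo)
--     return variations+old
--
-- def fiveCharacters(dictionary):
--     old = fourCharacters(dictionary)
--     variations = []
--     for k in dictionary:
--         for z in dictionary:
--             for d in dictionary:
--                 for l in dictionary:
--                     for i in dictionary:
--                         combo = str(k+z+d+l+i)
--                         variations.append(combo)
--     return variations+old
-- ===== SOURCE B (Python) =====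
-- def fiveCharacters(dictionary):
--     # rank/unrank: enumerate an integer index and decode it in base m,
--     # instead of nesting loops over the dictionary
--     m = len(dictionary)
--     out = []
--     for n in range(5, 0, -1):
--         for idx in range(m ** n):
--             s = ''
--             x = idx
--             for _ in range(n):
--                 x, r = divmod(x, m)
--                 s = dictionary[r] + s
--             out.append(s)
--     return out
-- ===== Notes on version B (the rewrite author's own statement) =====
-- stated objective: alternative
-- what changed: Replaces A's five hand-written fixed-depth nested loops over the dictionary with index arithmetic: for each length n it counts an integer through range(m**n) and decodes it in base m (divmod) to pick the n words, so no loop ever iterates the dictionary itself.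
import Mathlib
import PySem

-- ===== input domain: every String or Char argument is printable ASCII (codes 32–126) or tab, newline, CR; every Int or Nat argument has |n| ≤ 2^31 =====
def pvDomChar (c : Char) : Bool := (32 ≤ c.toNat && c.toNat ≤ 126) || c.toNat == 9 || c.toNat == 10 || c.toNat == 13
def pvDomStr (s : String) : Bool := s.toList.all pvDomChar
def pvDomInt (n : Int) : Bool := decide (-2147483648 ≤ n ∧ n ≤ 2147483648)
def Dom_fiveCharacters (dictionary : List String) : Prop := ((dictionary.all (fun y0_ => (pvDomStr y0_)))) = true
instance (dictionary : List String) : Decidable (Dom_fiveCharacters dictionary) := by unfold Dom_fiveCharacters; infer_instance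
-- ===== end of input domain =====

-- B replaces A's five fixed-depth loop nests by rank/unrank index arithmetic: for each length n
-- it counts idx through range(m^n) and decodes idx in base m to pick the words (alternative).

-- ===== PORT A =====
-- A's helpers, each a literal transliteration: loops append to 'variations', result is variations ++ old.
def oneCharacter (dictionary : List String) : List String :=
  dictionary.foldl (fun variations i => variations ++ [i]) []

def twoCharacters (dictionary : List String) : List String :=
  let old := oneCharacter dictionary
  let variations :=
    dictionary.foldl (fun acc k =>
      dictionary.foldl (fun acc i => acc ++ [k ++ i]) acc) []
  variations ++ old

def threeCharacters (dictionary : List String) : List String :=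
  let old := twoCharacters dictionary
  let variations :=
    dictionary.foldl (fun acc k =>
      dictionary.foldl (fun acc l =>
        dictionary.foldl (fun acc i => acc ++ [k ++ l ++ i]) acc) acc) []
  variations ++ old

def fourCharacters (dictionary : List String) : List String :=
  let old := threeCharacters dictionary
  let variations :=
    dictionary.foldl (fun acc k =>
      dictionary.foldl (fun acc d =>
        dictionary.foldl (fun acc l =>
          dictionary.foldl (fun acc i => acc ++ [k ++ d ++ l ++ i]) acc) acc) acc) []
  variations ++ old

def fiveCharacters (dictionary : List String) : List String :=
  let old := fourCharacters dictionary
  let variations :=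
    dictionary.foldl (fun acc k =>
      dictionary.foldl (fun acc z =>
        dictionary.foldl (fun acc d =>
          dictionary.foldl (fun acc l =>
            dictionary.foldl (fun acc i => acc ++ [k ++ z ++ d ++ l ++ i]) acc) acc) acc) acc) []
  variations ++ old

-- ===== PORT B =====
-- the inner 'for _ in range(n): x, r = divmod(x, m); s = dictionary[r] + s' loop, with its (x, s) state.
-- dictionary[r]: r = x % m is always < m = dictionary.length when this loop runs (m = 0 makes
-- range(m ** n) empty for n ≥ 1), so the Python indexing never raises; getD is exact here.
def pvDecodeIter (dictionary : List String) (m : Nat) : Nat → Nat → String → String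
  | 0, _, s => s
  | k + 1, x, s => pvDecodeIter dictionary m k (x / m) ((dictionary.getD (x % m) "") ++ s)

def fiveCharacters_alt (dictionary : List String) : List String :=
  let m := dictionary.length
  [5, 4, 3, 2, 1].flatMap (fun n =>
    (List.range (m ^ n)).map (fun idx => pvDecodeIter dictionary m n idx ""))

-- ===== PRECONDITION & SPEC =====
def Spec_fiveCharacters (dictionary : List String) (out : List String) : Prop := out = fiveCharacters_alt dictionary
instance (dictionary : List String) (out : List String) : Decidable (Spec_fiveCharacters dictionary out) := by unfold Spec_fiveCharacters; infer_instance

-- ===== CLAIM (what is proved, stated in full; the proofs are below) =====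
def Claim_equal_fiveCharacters : Prop := ∀ (dictionary : List String), Dom_fiveCharacters dictionary → Spec_fiveCharacters dictionary (fiveCharacters dictionary)

-- ===== LEMMAS AND PROOFS =====

-- the common intermediate form: all length-n products, leftmost word outermost
def pvProductJoin (dictionary : List String) : Nat → List String
  | 0 => [""]
  | n + 1 => dictionary.flatMap (fun x => (pvProductJoin dictionary n).map (fun s => x ++ s))

-- A foldl that only appends to its accumulator is 'init ++ flatMap'.
theorem pv_foldl_append {α β : Type} (f : α → List β) (l : List α) (init : List β) :
    l.foldl (fun acc x => acc ++ f x) init = init ++ l.flatMap f := by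
  induction l generalizing init with
  | nil => simp
  | cons x xs ih => simp [List.foldl_cons, ih, List.append_assoc]

theorem pvProductJoin_one (d : List String) : pvProductJoin d 1 = d := by
  simp [pvProductJoin]

theorem pvProductJoin_two (d : List String) :
    pvProductJoin d 2 = d.flatMap (fun k => d.flatMap (fun i => [k ++ i])) := by
  simp [pvProductJoin, ← List.map_eq_flatMap]

theorem pvProductJoin_three (d : List String) :
    pvProductJoin d 3 = d.flatMap (fun k => d.flatMap (fun l => d.flatMap (fun i => [k ++ l ++ i]))) := by
  simp [pvProductJoin, List.map_flatMap, List.map_map, Function.comp_def, String.append_assoc, ← List.map_eq_flatMap]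

theorem pvProductJoin_four (d : List String) :
    pvProductJoin d 4
      = d.flatMap (fun k => d.flatMap (fun e => d.flatMap (fun l => d.flatMap (fun i => [k ++ e ++ l ++ i])))) := by
  simp [pvProductJoin, List.map_flatMap, List.map_map, Function.comp_def, String.append_assoc, ← List.map_eq_flatMap]

theorem pvProductJoin_five (d : List String) :
    pvProductJoin d 5
      = d.flatMap (fun k => d.flatMap (fun z => d.flatMap (fun e => d.flatMap (fun l => d.flatMap (fun i => [k ++ z ++ e ++ l ++ i]))))) := by
  simp [pvProductJoin, List.map_flatMap, List.map_map, Function.comp_def, String.append_assoc, ← List.map_eq_flatMap]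

theorem oneCharacter_eq (d : List String) : oneCharacter d = d := by
  unfold oneCharacter
  have := pv_foldl_append (fun i : String => [i]) d []
  simpa using this

theorem twoCharacters_eq (d : List String) :
    twoCharacters d = pvProductJoin d 2 ++ pvProductJoin d 1 := by
  unfold twoCharacters
  simp only [pvProductJoin_one, oneCharacter_eq]
  congr 1
  have : (fun acc k => d.foldl (fun acc i => acc ++ [k ++ i]) acc)
       = (fun (acc : List String) (k : String) => acc ++ d.flatMap (fun i => [k ++ i])) := by
    funext acc k; exact pv_foldl_append (fun i => [k ++ i]) d acc
  rw [this, pv_foldl_append]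
  rw [pvProductJoin_two]; simp

theorem threeCharacters_eq (d : List String) :
    threeCharacters d = pvProductJoin d 3 ++ (pvProductJoin d 2 ++ pvProductJoin d 1) := by
  unfold threeCharacters
  rw [twoCharacters_eq]
  have h1 : ∀ (k l : String) (acc : List String),
      d.foldl (fun acc i => acc ++ [k ++ l ++ i]) acc = acc ++ d.flatMap (fun i => [k ++ l ++ i]) :=
    fun k l acc => pv_foldl_append _ d acc
  have h2 : ∀ (k : String) (acc : List String),
      d.foldl (fun acc l => d.foldl (fun acc i => acc ++ [k ++ l ++ i]) acc) acc
        = acc ++ d.flatMap (fun l => d.flatMap (fun i => [k ++ l ++ i])) := by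
    intro k acc
    have : (fun (acc : List String) (l : String) => d.foldl (fun acc i => acc ++ [k ++ l ++ i]) acc)
         = (fun acc l => acc ++ d.flatMap (fun i => [k ++ l ++ i])) := by
      funext acc l; exact h1 k l acc
    rw [this, pv_foldl_append]
  have : (fun (acc : List String) (k : String) =>
            d.foldl (fun acc l => d.foldl (fun acc i => acc ++ [k ++ l ++ i]) acc) acc)
       = (fun acc k => acc ++ d.flatMap (fun l => d.flatMap (fun i => [k ++ l ++ i]))) := by
    funext acc k; exact h2 k acc
  rw [this, pv_foldl_append]
  rw [pvProductJoin_three]; simp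

theorem fourCharacters_eq (d : List String) :
    fourCharacters d = pvProductJoin d 4 ++ (pvProductJoin d 3 ++ (pvProductJoin d 2 ++ pvProductJoin d 1)) := by
  unfold fourCharacters
  rw [threeCharacters_eq]
  have h1 : ∀ (k e l : String) (acc : List String),
      d.foldl (fun acc i => acc ++ [k ++ e ++ l ++ i]) acc = acc ++ d.flatMap (fun i => [k ++ e ++ l ++ i]) :=
    fun _ _ _ acc => pv_foldl_append _ d acc
  have h2 : ∀ (k e : String) (acc : List String),
      d.foldl (fun acc l => d.foldl (fun acc i => acc ++ [k ++ e ++ l ++ i]) acc) acc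
        = acc ++ d.flatMap (fun l => d.flatMap (fun i => [k ++ e ++ l ++ i])) := by
    intro k e acc
    have : (fun (acc : List String) (l : String) => d.foldl (fun acc i => acc ++ [k ++ e ++ l ++ i]) acc)
         = (fun acc l => acc ++ d.flatMap (fun i => [k ++ e ++ l ++ i])) := by
      funext acc l; exact h1 k e l acc
    rw [this, pv_foldl_append]
  have h3 : ∀ (k : String) (acc : List String),
      d.foldl (fun acc e => d.foldl (fun acc l => d.foldl (fun acc i => acc ++ [k ++ e ++ l ++ i]) acc) acc) acc
        = acc ++ d.flatMap (fun e => d.flatMap (fun l => d.flatMap (fun i => [k ++ e ++ l ++ i]))) := by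
    intro k acc
    have : (fun (acc : List String) (e : String) =>
              d.foldl (fun acc l => d.foldl (fun acc i => acc ++ [k ++ e ++ l ++ i]) acc) acc)
         = (fun acc e => acc ++ d.flatMap (fun l => d.flatMap (fun i => [k ++ e ++ l ++ i]))) := by
      funext acc e; exact h2 k e acc
    rw [this, pv_foldl_append]
  have : (fun (acc : List String) (k : String) =>
            d.foldl (fun acc e => d.foldl (fun acc l => d.foldl (fun acc i => acc ++ [k ++ e ++ l ++ i]) acc) acc) acc)
       = (fun acc k => acc ++ d.flatMap (fun e => d.flatMap (fun l => d.flatMap (fun i => [k ++ e ++ l ++ i])))) := by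
    funext acc k; exact h3 k acc
  rw [this, pv_foldl_append]
  rw [pvProductJoin_four]; simp

theorem fiveCharacters_eq (d : List String) :
    fiveCharacters d
      = pvProductJoin d 5 ++ (pvProductJoin d 4 ++ (pvProductJoin d 3 ++ (pvProductJoin d 2 ++ pvProductJoin d 1))) := by
  unfold fiveCharacters
  rw [fourCharacters_eq]
  have h1 : ∀ (k z e l : String) (acc : List String),
      d.foldl (fun acc i => acc ++ [k ++ z ++ e ++ l ++ i]) acc = acc ++ d.flatMap (fun i => [k ++ z ++ e ++ l ++ i]) :=
    fun _ _ _ _ acc => pv_foldl_append _ d acc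
  have h2 : ∀ (k z e : String) (acc : List String),
      d.foldl (fun acc l => d.foldl (fun acc i => acc ++ [k ++ z ++ e ++ l ++ i]) acc) acc
        = acc ++ d.flatMap (fun l => d.flatMap (fun i => [k ++ z ++ e ++ l ++ i])) := by
    intro k z e acc
    have : (fun (acc : List String) (l : String) => d.foldl (fun acc i => acc ++ [k ++ z ++ e ++ l ++ i]) acc)
         = (fun acc l => acc ++ d.flatMap (fun i => [k ++ z ++ e ++ l ++ i])) := by
      funext acc l; exact h1 k z e l acc
    rw [this, pv_foldl_append]
  have h3 : ∀ (k z : String) (acc : List String),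
      d.foldl (fun acc e => d.foldl (fun acc l => d.foldl (fun acc i => acc ++ [k ++ z ++ e ++ l ++ i]) acc) acc) acc
        = acc ++ d.flatMap (fun e => d.flatMap (fun l => d.flatMap (fun i => [k ++ z ++ e ++ l ++ i]))) := by
    intro k z acc
    have : (fun (acc : List String) (e : String) =>
              d.foldl (fun acc l => d.foldl (fun acc i => acc ++ [k ++ z ++ e ++ l ++ i]) acc) acc)
         = (fun acc e => acc ++ d.flatMap (fun l => d.flatMap (fun i => [k ++ z ++ e ++ l ++ i]))) := by
      funext acc e; exact h2 k z e acc
    rw [this, pv_foldl_append]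
  have h4 : ∀ (k : String) (acc : List String),
      d.foldl (fun acc z => d.foldl (fun acc e => d.foldl (fun acc l => d.foldl (fun acc i => acc ++ [k ++ z ++ e ++ l ++ i]) acc) acc) acc) acc
        = acc ++ d.flatMap (fun z => d.flatMap (fun e => d.flatMap (fun l => d.flatMap (fun i => [k ++ z ++ e ++ l ++ i])))) := by
    intro k acc
    have : (fun (acc : List String) (z : String) =>
              d.foldl (fun acc e => d.foldl (fun acc l => d.foldl (fun acc i => acc ++ [k ++ z ++ e ++ l ++ i]) acc) acc) acc)
         = (fun acc z => acc ++ d.flatMap (fun e => d.flatMap (fun l => d.flatMap (fun i => [k ++ z ++ e ++ l ++ i])))) := by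
      funext acc z; exact h3 k z acc
    rw [this, pv_foldl_append]
  have : (fun (acc : List String) (k : String) =>
            d.foldl (fun acc z => d.foldl (fun acc e => d.foldl (fun acc l => d.foldl (fun acc i => acc ++ [k ++ z ++ e ++ l ++ i]) acc) acc) acc) acc)
       = (fun acc k => acc ++ d.flatMap (fun z => d.flatMap (fun e => d.flatMap (fun l => d.flatMap (fun i => [k ++ z ++ e ++ l ++ i]))))) := by
    funext acc k; exact h4 k acc
  rw [this, pv_foldl_append]
  rw [pvProductJoin_five]; simp

-- ===== B-side lemmas: base-m decoding enumerates pvProductJoin =====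

-- the loop with accumulator equals the pure right-appending decode
def pvDecode (d : List String) (m : Nat) : Nat → Nat → String
  | 0, _ => ""
  | n + 1, x => pvDecode d m n (x / m) ++ (d.getD (x % m) "")

theorem pvDecodeIter_eq (d : List String) (m : Nat) :
    ∀ n x s, pvDecodeIter d m n x s = pvDecode d m n x ++ s := by
  intro n
  induction n with
  | zero => intro x s; simp [pvDecodeIter, pvDecode]
  | succ k ih => intro x s; simp [pvDecodeIter, pvDecode, ih, String.append_assoc]

-- pvProductJoin with the new word appended on the right instead of prepended on the left
theorem pvProductJoin_snoc (d : List String) (n : Nat) :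
    pvProductJoin d (n + 1) = (pvProductJoin d n).flatMap (fun s => d.map (fun x => s ++ x)) := by
  induction n with
  | zero => simp [pvProductJoin]
  | succ k ih =>
    show d.flatMap (fun x => (pvProductJoin d (k + 1)).map (fun s => x ++ s)) = _
    conv_lhs => rw [ih]
    conv_rhs => rw [show pvProductJoin d (k + 1)
      = d.flatMap (fun x => (pvProductJoin d k).map (fun s => x ++ s)) from rfl]
    simp [List.flatMap_assoc, List.map_flatMap, List.flatMap_map, List.map_map,
      Function.comp_def, String.append_assoc]

theorem map_range_length {α β : Type} (d : List α) (dflt : α) (f : α → β) :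
    (List.range d.length).map (fun r => f (d.getD r dflt)) = d.map f := by
  induction d with
  | nil => simp
  | cons x xs ih =>
    rw [show (x :: xs).length = xs.length + 1 from rfl, List.range_succ_eq_map]
    simp only [List.map_cons, List.map_map, Function.comp_def]
    exact congrArg (f x :: ·) (ih)

theorem range_mul (a m : Nat) :
    List.range (a * m) = (List.range a).flatMap (fun q => (List.range m).map (fun r => q * m + r)) := by
  induction a with
  | zero => simp
  | succ k ih =>
    rw [Nat.succ_mul, List.range_add, ih, List.range_succ]
    simp

theorem decode_range (d : List String) :
    ∀ n, (List.range (d.length ^ n)).map (fun idx => pvDecode d d.length n idx) = pvProductJoin d n := by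
  intro n
  induction n with
  | zero => simp [pvDecode, pvProductJoin]
  | succ k ih =>
    rcases Nat.eq_zero_or_pos d.length with hm | hm
    · rcases List.length_eq_zero_iff.mp hm with rfl
      simp [pvProductJoin]
    · rw [pow_succ, range_mul, List.map_flatMap]
      rw [pvProductJoin_snoc, ← ih, List.flatMap_map]
      congr 1
      funext q
      simp only [List.map_map, Function.comp_def]
      have key : ∀ r ∈ List.range d.length,
          pvDecode d d.length (k + 1) (q * d.length + r)
            = pvDecode d d.length k q ++ d.getD r "" := by
        intro r hr
        have hrlt : r < d.length := List.mem_range.mp hr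
        show pvDecode d d.length k ((q * d.length + r) / d.length) ++
            (d.getD ((q * d.length + r) % d.length) "") = _
        rw [Nat.mul_comm q d.length, Nat.mul_add_div hm, Nat.mul_add_mod,
          Nat.div_eq_of_lt hrlt, Nat.mod_eq_of_lt hrlt]
        simp
      rw [List.map_congr_left key]
      exact map_range_length d "" (fun x => pvDecode d d.length k q ++ x)

theorem fiveCharacters_alt_eq (d : List String) :
    fiveCharacters_alt d
      = pvProductJoin d 5 ++ (pvProductJoin d 4 ++ (pvProductJoin d 3 ++ (pvProductJoin d 2 ++ pvProductJoin d 1))) := by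
  unfold fiveCharacters_alt
  have h : ∀ n, (List.range (d.length ^ n)).map (fun idx => pvDecodeIter d d.length n idx "")
      = pvProductJoin d n := by
    intro n
    have : (fun idx => pvDecodeIter d d.length n idx "") = (fun idx => pvDecode d d.length n idx) := by
      funext idx; rw [pvDecodeIter_eq]; simp
    rw [this, decode_range]
  simp [List.flatMap, h]

-- ===== VERDICT (by name: the statement is the Claim_ definition above) =====
theorem fiveCharacters_spec : Claim_equal_fiveCharacters := by
  intro d _
  unfold Spec_fiveCharacters
  rw [fiveCharacters_eq, fiveCharacters_alt_eq]
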